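-- pv_equiv track=rewrite | github.com/drekbad/smb-smasher | smb-shasher.py | classify_share
-- ===== SOURCE A (Python) =====
-- from typing import Dict, List, Tuple, Optional, Iterable
--
-- def classify_share(perms_by_user: Dict[str, str], user_order: List[str]) -> str:
--     """
--     'all_same' if every listed user has identical perm and none missing,
--     'partial' if some users missing entries but others have,
--     'mixed' if all present but differ,
--     'none' if no entries.
--     """
--     vals = [perms_by_user.get(u) for u in user_order]
--     have_vals = [v for v in vals if v is not None]
--     if not have_vals:
--         return 'none'
--     unique = set(have_vals)
--     missing = any(v is None for v in vals)
--     if len(unique) == 1 and not missing: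
--         return 'all_same'
--     if missing:
--         return 'partial'
--     return 'mixed'
-- ===== SOURCE B (Python) =====
-- def classify_share(perms_by_user, user_order):
--     first = None
--     missing = False
--     all_same = True
--     for u in user_order:
--         v = perms_by_user.get(u)
--         if v is None:
--             missing = True
--         elif first is None:
--             first = v
--         elif v != first:
--             all_same = False
--     if first is None:
--         return 'none'
--     if missing:
--         return 'partial'
--     if all_same:
--         return 'all_same'
--     return 'mixed'
-- ===== Notes on version B (the rewrite author's own statement) =====
-- stated objective: simpler
-- what changed: Replaces the multi-pass build (vals list, have_vals filter, unique set, any-missing scan) with a single loop over user_order keeping only three scalars: the first present value, a missing flag, and an all_same flag.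
import Mathlib
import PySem

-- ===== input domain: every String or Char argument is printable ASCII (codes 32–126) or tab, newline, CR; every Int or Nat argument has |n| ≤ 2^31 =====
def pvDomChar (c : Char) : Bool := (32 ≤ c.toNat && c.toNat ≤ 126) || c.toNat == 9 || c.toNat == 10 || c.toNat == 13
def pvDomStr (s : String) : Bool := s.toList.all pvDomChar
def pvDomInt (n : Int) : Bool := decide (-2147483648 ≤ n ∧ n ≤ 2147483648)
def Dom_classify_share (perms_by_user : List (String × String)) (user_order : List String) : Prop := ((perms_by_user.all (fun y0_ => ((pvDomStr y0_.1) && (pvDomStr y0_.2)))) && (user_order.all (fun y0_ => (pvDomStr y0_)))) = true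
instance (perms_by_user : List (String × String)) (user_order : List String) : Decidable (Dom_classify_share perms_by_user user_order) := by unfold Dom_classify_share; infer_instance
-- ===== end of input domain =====

-- B replaces A's multi-pass build (vals list, have_vals filter, unique set, any-missing scan)
-- with one loop over user_order keeping three scalars (first present value, missing flag, all_same flag): simpler.

-- ===== PORT A =====
def classify_share (perms_by_user : List (String × String)) (user_order : List String) : String :=
  let vals := user_order.map (fun u => PySem.Dict.get? ⟨perms_by_user⟩ u)
  let have_vals := vals.filterMap id
  if have_vals = [] then "none"
  else
    let unique : PySem.Set String := PySem.Set.ofList have_vals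
    let missing := vals.any (fun v => v.isNone)
    if unique.length == 1 && !missing then "all_same"
    else if missing then "partial"
    else "mixed"

-- ===== PORT B =====
-- one step of Source B's loop body on the state (first, missing, all_same)
def bStep (st : Option String × Bool × Bool) (v : Option String) : Option String × Bool × Bool :=
  match v with
  | none => (st.1, true, st.2.2)
  | some x =>
    match st.1 with
    | none => (some x, st.2.1, st.2.2)
    | some y => (some y, st.2.1, st.2.2 && (x == y))

def classify_share_alt (perms_by_user : List (String × String)) (user_order : List String) : String :=
  let st := user_order.foldl (fun st u => bStep st (PySem.Dict.get? ⟨perms_by_user⟩ u)) (none, false, true)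
  if st.1.isNone then "none"
  else if st.2.1 then "partial"
  else if st.2.2 then "all_same"
  else "mixed"

-- ===== PRECONDITION & SPEC =====
def Spec_classify_share (perms_by_user : List (String × String)) (user_order : List String) (out : String) : Prop := out = classify_share_alt perms_by_user user_order
instance (perms_by_user : List (String × String)) (user_order : List String) (out : String) : Decidable (Spec_classify_share perms_by_user user_order out) := by unfold Spec_classify_share; infer_instance

-- ===== CLAIM (what is proved, stated in full; the proofs are below) =====
def Claim_equal_classify_share : Prop := ∀ (perms_by_user : List (String × String)) (user_order : List String), Dom_classify_share perms_by_user user_order → Spec_classify_share perms_by_user user_order (classify_share perms_by_user user_order)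

-- ===== LEMMAS AND PROOFS =====

-- once a first value y has been seen, the fold keeps y, ORs in missing, ANDs equality with y
theorem bStep_after (vals : List (Option String)) (y : String) (m s : Bool) :
    vals.foldl bStep (some y, m, s) =
      (some y, m || vals.any (fun v => v.isNone), s && (vals.filterMap id).all (· == y)) := by
  induction vals generalizing m s with
  | nil => simp
  | cons v rest ih =>
    cases v with
    | none => simp [bStep, ih]
    | some x => simp [bStep, ih, Bool.and_assoc]

def allSameB : List String → Bool
  | [] => true
  | x :: xs => xs.all (· == x)

-- full characterisation of the fold from the initial "no value yet" state
theorem bStep_from_none (vals : List (Option String)) (m : Bool) :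
    vals.foldl bStep (none, m, true) =
      ((vals.filterMap id).head?, m || vals.any (fun v => v.isNone), allSameB (vals.filterMap id)) := by
  induction vals generalizing m with
  | nil => simp [allSameB]
  | cons v rest ih =>
    cases v with
    | none => simp [bStep, ih]
    | some x => simp [bStep, bStep_after, allSameB]

theorem foldl_add_len_ge (xs : List String) (s : List String) :
    s.length ≤ (xs.foldl PySem.Set.add s).length := by
  induction xs generalizing s with
  | nil => simp
  | cons a rest ih =>
    simp only [List.foldl_cons, PySem.Set.add]
    split
    · exact ih s
    · calc s.length ≤ (s ++ [a]).length := by simp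
        _ ≤ _ := ih (s ++ [a])

theorem foldl_add_len_eq (xs : List String) (s : List String) :
    ((xs.foldl PySem.Set.add s).length = s.length) ↔ ∀ a ∈ xs, a ∈ s := by
  induction xs generalizing s with
  | nil => simp
  | cons a rest ih =>
    simp only [List.foldl_cons, PySem.Set.add, PySem.Set.contains, List.mem_cons]
    by_cases h : a ∈ s
    · rw [if_pos (by simp [h]), ih]
      constructor
      · intro hs b hb
        rcases hb with rfl | hb
        · exact h
        · exact hs b hb
      · intro hs b hb; exact hs b (Or.inr hb)
    · rw [if_neg (by simp [h])]
      constructor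
      · intro hlen
        have := foldl_add_len_ge rest (s ++ [a])
        simp at this
        omega
      · intro hs
        exact absurd (hs a (Or.inl rfl)) h

-- the deduplicated list of a nonempty list has length 1 iff every element equals the head
theorem ofList_len_one (x : String) (xs : List String) :
    ((PySem.Set.ofList (x :: xs)).length == 1) = xs.all (· == x) := by
  rw [PySem.Set.ofList_eq_foldl]
  have hadd : PySem.Set.add ([] : List String) x = [x] := by
    simp [PySem.Set.add, PySem.Set.contains]
  simp only [List.foldl_cons, hadd]
  have hlen : ((xs.foldl PySem.Set.add [x]).length = 1) ↔ ∀ a ∈ xs, a = x := by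
    rw [show (1 : Nat) = ([x] : List String).length from rfl, foldl_add_len_eq]
    simp
  rw [Bool.eq_iff_iff]
  simp only [beq_iff_eq, List.all_eq_true]
  exact hlen

-- ===== VERDICT (by name: the statement is the Claim_ definition above) =====
theorem classify_share_spec : Claim_equal_classify_share := by
  intro perms order _
  unfold Spec_classify_share classify_share classify_share_alt
  rw [show (fun st u => bStep st (PySem.Dict.get? ⟨perms⟩ u)) = (fun st u => bStep st ((fun u => PySem.Dict.get? (⟨perms⟩ : PySem.Dict String String) u) u)) from rfl, ← List.foldl_map, bStep_from_none]
  cases hfv : (order.map (fun u => PySem.Dict.get? (⟨perms⟩ : PySem.Dict String String) u)).filterMap id with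
  | nil =>
    have hall : ∀ u ∈ order, PySem.Dict.get? (⟨perms⟩ : PySem.Dict String String) u = none :=
      List.filterMap_eq_nil_iff.mp (by simpa using hfv)
    simp [hall]
    intro u hu hnu
    exact absurd (hall u hu) hnu
  | cons x xs =>
    have hfv2 : List.filterMap (fun u => PySem.Dict.get? (⟨perms⟩ : PySem.Dict String String) u) order = x :: xs := by
      simpa using hfv
    have hne : ¬ ∀ u ∈ order, PySem.Dict.get? (⟨perms⟩ : PySem.Dict String String) u = none := by
      intro hall
      rw [List.filterMap_eq_nil_iff.mpr hall] at hfv2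
      cases hfv2
    cases hm : (order.map (fun u => PySem.Dict.get? (⟨perms⟩ : PySem.Dict String String) u)).any (fun v => v.isNone) with
    | true =>
      simp [hm]
      simpa using hne
    | false =>
      have hlen := ofList_len_one x xs
      cases h : xs.all (· == x) with
      | true =>
        rw [h] at hlen
        have hl : (PySem.Set.ofList (x :: xs)).length = 1 := by simpa using hlen
        simp [hm, hfv2, hl, allSameB, h]
      | false =>
        rw [h] at hlen
        have hl : (PySem.Set.ofList (x :: xs)).length ≠ 1 := by simpa using hlen
        simp [hm, hfv2, hl, allSameB, h]
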